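-- pv_equiv track=rewrite | github.com/ibushimaru/felix-tm | felix_tm/core/distance.py | bag_distance
-- ===== SOURCE A (Python) =====
-- def bag_distance(source: str, target: str) -> int:
--     """Calculate bag-of-characters distance (fast pre-filter).
--
--     Counts unmatched characters between two multisets.
--     This gives a LOWER BOUND on the actual edit distance,
--     so if bag_distance > threshold, edit_distance will also exceed it.
--
--     Args:
--         source: Source string.
--         target: Target string.
--
--     Returns:
--         Number of unmatched characters.
--     """
--     # Build character frequency maps
--     freq_s: dict[str, int] = {}
--     for ch in source:
--         freq_s[ch] = freq_s.get(ch, 0) + 1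
--
--     freq_t: dict[str, int] = {}
--     for ch in target:
--         freq_t[ch] = freq_t.get(ch, 0) + 1
--
--     # Count excess characters in each direction
--     diff = 0
--     all_chars = set(freq_s) | set(freq_t)
--     for ch in all_chars:
--         diff += abs(freq_s.get(ch, 0) - freq_t.get(ch, 0))
--
--     return diff
-- ===== SOURCE B (Python) =====
-- def bag_distance(source: str, target: str) -> int:
--     """Bag distance by greedy matching: cancel each source char against one
--     occurrence in the target; unmatched source chars plus leftover target
--     chars are the distance. No frequency counting at all."""
--     leftover = list(target)
--     unmatched = 0
--     for ch in source:
--         if ch in leftover: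
--             leftover.remove(ch)
--         else:
--             unmatched += 1
--     return unmatched + len(leftover)
-- ===== Notes on version B (the rewrite author's own statement) =====
-- stated objective: alternative
-- what changed: B does no frequency counting: it greedily cancels each source character against one occurrence in a mutable copy of the target and returns unmatched-source + leftover-target, instead of A's two frequency dicts joined by a key-union pass summing absolute count differences.
import Mathlib
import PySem

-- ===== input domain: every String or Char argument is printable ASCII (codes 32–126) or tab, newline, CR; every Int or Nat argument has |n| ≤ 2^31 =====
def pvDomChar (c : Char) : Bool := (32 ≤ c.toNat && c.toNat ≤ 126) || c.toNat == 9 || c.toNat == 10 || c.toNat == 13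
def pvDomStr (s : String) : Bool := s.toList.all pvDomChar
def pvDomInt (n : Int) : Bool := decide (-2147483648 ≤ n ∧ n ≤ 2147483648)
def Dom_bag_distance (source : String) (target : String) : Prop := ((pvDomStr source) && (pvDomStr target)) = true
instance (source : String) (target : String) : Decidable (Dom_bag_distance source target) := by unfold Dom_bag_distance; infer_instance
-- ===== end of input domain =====

-- B replaces A's two frequency maps and key-union pass by greedy matching: each source character
-- cancels one occurrence in a shrinking copy of the target; no counting (objective: alternative).

-- ===== PORT A =====
def bag_distance (source : String) (target : String) : Int :=
  let freq_s := source.toList.foldl (fun d ch => d.insert ch (d.getD ch 0 + 1)) (PySem.Dict.empty : PySem.Dict Char Int)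
  let freq_t := target.toList.foldl (fun d ch => d.insert ch (d.getD ch 0 + 1)) (PySem.Dict.empty : PySem.Dict Char Int)
  let all_chars := PySem.Set.union (PySem.Set.ofList freq_s.keys) (PySem.Set.ofList freq_t.keys)
  all_chars.foldl (fun diff ch => diff + |freq_s.getD ch 0 - freq_t.getD ch 0|) 0

-- ===== PORT B =====
-- 'leftover.remove(ch)' under the 'ch in leftover' guard is exactly List.erase (first occurrence).
def bag_distance_alt (source : String) (target : String) : Int :=
  let st := source.toList.foldl
    (fun (st : List Char × Int) ch =>
      if ch ∈ st.1 then (st.1.erase ch, st.2) else (st.1, st.2 + 1))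
    (target.toList, (0 : Int))
  st.2 + st.1.length

-- ===== PRECONDITION & SPEC =====
def Spec_bag_distance (source : String) (target : String) (out : Int) : Prop := out = bag_distance_alt source target
instance (source : String) (target : String) (out : Int) : Decidable (Spec_bag_distance source target out) := by unfold Spec_bag_distance; infer_instance

-- ===== CLAIM (what is proved, stated in full; the proofs are below) =====
def Claim_equal_bag_distance : Prop := ∀ (source : String) (target : String), Dom_bag_distance source target → Spec_bag_distance source target (bag_distance source target)

-- ===== LEMMAS AND PROOFS =====

-- B's loop invariant: the accumulated state measures the multiset differences.
theorem b_loop_inv (s : List Char) : ∀ (tl : List Char) (d : Int),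
    ((s.foldl (fun (st : List Char × Int) ch =>
        if ch ∈ st.1 then (st.1.erase ch, st.2) else (st.1, st.2 + 1)) (tl, d)).2
      + ((s.foldl (fun (st : List Char × Int) ch =>
        if ch ∈ st.1 then (st.1.erase ch, st.2) else (st.1, st.2 + 1)) (tl, d)).1.length : Int))
    = d + (((s : Multiset Char) - (tl : Multiset Char)).card : Int)
        + (((tl : Multiset Char) - (s : Multiset Char)).card : Int) := by
  induction s with
  | nil => intro tl d; simp
  | cons ch rest ih =>
    intro tl d
    simp only [List.foldl_cons]
    by_cases h : ch ∈ tl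
    · rw [if_pos h, ih]
      have e1 : ((ch :: rest : List Char) : Multiset Char) - (tl : Multiset Char)
          = ((rest : List Char) : Multiset Char) - ((tl.erase ch : List Char) : Multiset Char) := by
        ext c
        simp only [Multiset.count_sub, Multiset.coe_count]
        rcases eq_or_ne c ch with rfl | hne
        · have : 1 ≤ tl.count c := List.count_pos_iff.mpr h
          rw [List.count_erase_self]; simp [List.count_cons]; omega
        · rw [List.count_erase_of_ne hne]; simp [List.count_cons, hne, Ne.symm hne]
      have e2 : (tl : Multiset Char) - ((ch :: rest : List Char) : Multiset Char)
          = ((tl.erase ch : List Char) : Multiset Char) - ((rest : List Char) : Multiset Char) := by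
        ext c
        simp only [Multiset.count_sub, Multiset.coe_count]
        rcases eq_or_ne c ch with rfl | hne
        · rw [List.count_erase_self]; simp [List.count_cons]; omega
        · rw [List.count_erase_of_ne hne]; simp [List.count_cons, hne, Ne.symm hne]
      rw [e1, e2]
    · rw [if_neg h, ih]
      have h0 : tl.count ch = 0 := List.count_eq_zero.mpr h
      have e1 : ((ch :: rest : List Char) : Multiset Char) - (tl : Multiset Char)
          = ch ::ₘ (((rest : List Char) : Multiset Char) - (tl : Multiset Char)) := by
        ext c
        simp only [Multiset.count_sub, Multiset.count_cons, Multiset.coe_count]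
        rcases eq_or_ne c ch with rfl | hne
        · simp [List.count_cons, h0]
        · simp [List.count_cons, hne, Ne.symm hne]
      have e2 : (tl : Multiset Char) - ((ch :: rest : List Char) : Multiset Char)
          = (tl : Multiset Char) - ((rest : List Char) : Multiset Char) := by
        ext c
        simp only [Multiset.count_sub, Multiset.coe_count]
        rcases eq_or_ne c ch with rfl | hne
        · simp [h0]
        · simp [List.count_cons, hne, Ne.symm hne]
      rw [e1, e2, Multiset.card_cons]
      push_cast
      ring

-- the two truncated differences sum to the absolute count difference, summed over the joint support
theorem cards_eq_sum (s t : List Char) :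
    ((((s : Multiset Char) - (t : Multiset Char)).card : Int)
      + (((t : Multiset Char) - (s : Multiset Char)).card : Int))
    = ∑ c ∈ (s ++ t).toFinset, |(s.count c : Int) - (t.count c : Int)| := by
  have hsub1 : ((s : Multiset Char) - (t : Multiset Char)).toFinset ⊆ (s ++ t).toFinset := by
    intro c hc
    rw [Multiset.mem_toFinset] at hc
    have := Multiset.count_pos.mpr hc
    rw [Multiset.count_sub, Multiset.coe_count, Multiset.coe_count] at this
    have : c ∈ s := List.count_pos_iff.mp (by omega)
    simp [this]
  have hsub2 : ((t : Multiset Char) - (s : Multiset Char)).toFinset ⊆ (s ++ t).toFinset := by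
    intro c hc
    rw [Multiset.mem_toFinset] at hc
    have := Multiset.count_pos.mpr hc
    rw [Multiset.count_sub, Multiset.coe_count, Multiset.coe_count] at this
    have : c ∈ t := List.count_pos_iff.mp (by omega)
    simp [this]
  have c1 : (((s : Multiset Char) - (t : Multiset Char)).card : Int)
      = ∑ c ∈ (s ++ t).toFinset, ((s.count c - t.count c : ℕ) : Int) := by
    rw [← Multiset.toFinset_sum_count_eq ((s : Multiset Char) - (t : Multiset Char))]
    push_cast
    rw [Finset.sum_subset hsub1 (by
      intro c _ hc
      rw [Multiset.mem_toFinset] at hc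
      have := Multiset.count_eq_zero.mpr hc
      rw [Multiset.count_sub, Multiset.coe_count, Multiset.coe_count] at this
      simp only [Multiset.count_sub, Multiset.coe_count]; omega)]
    apply Finset.sum_congr rfl
    intro c _
    rw [Multiset.count_sub, Multiset.coe_count, Multiset.coe_count]
  have c2 : (((t : Multiset Char) - (s : Multiset Char)).card : Int)
      = ∑ c ∈ (s ++ t).toFinset, ((t.count c - s.count c : ℕ) : Int) := by
    rw [← Multiset.toFinset_sum_count_eq ((t : Multiset Char) - (s : Multiset Char))]
    push_cast
    rw [Finset.sum_subset hsub2 (by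
      intro c _ hc
      rw [Multiset.mem_toFinset] at hc
      have := Multiset.count_eq_zero.mpr hc
      rw [Multiset.count_sub, Multiset.coe_count, Multiset.coe_count] at this
      simp only [Multiset.count_sub, Multiset.coe_count]; omega)]
    apply Finset.sum_congr rfl
    intro c _
    rw [Multiset.count_sub, Multiset.coe_count, Multiset.coe_count]
  rw [c1, c2, ← Finset.sum_add_distrib]
  apply Finset.sum_congr rfl
  intro c _
  rcases le_total (s.count c) (t.count c) with hle | hle
  · rw [abs_of_nonpos (by push_cast; omega)]; push_cast; omega
  · rw [abs_of_nonneg (by push_cast; omega)]; push_cast; omega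

-- A equals the joint-support sum of absolute count differences.
theorem a_eq_sum (source target : String) :
    bag_distance source target
    = ∑ c ∈ (source.toList ++ target.toList).toFinset,
        |(source.toList.count c : Int) - (target.toList.count c : Int)| := by
  unfold bag_distance
  set s := source.toList with hs
  set t := target.toList with ht
  simp only []
  have hskeys : (s.foldl (fun d ch => d.insert ch (d.getD ch 0 + 1)) (PySem.Dict.empty : PySem.Dict Char Int)).keys = PySem.Set.ofList s := by
    rw [PySem.Dict.keys_foldl_insert, PySem.Dict.keys_empty, PySem.Set.update_nil_left]
  have htkeys : (t.foldl (fun d ch => d.insert ch (d.getD ch 0 + 1)) (PySem.Dict.empty : PySem.Dict Char Int)).keys = PySem.Set.ofList t := by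
    rw [PySem.Dict.keys_foldl_insert, PySem.Dict.keys_empty, PySem.Set.update_nil_left]
  rw [PySem.List.foldl_add (g := fun ch => |(s.foldl (fun d ch => d.insert ch (d.getD ch 0 + 1)) (PySem.Dict.empty : PySem.Dict Char Int)).getD ch 0 - (t.foldl (fun d ch => d.insert ch (d.getD ch 0 + 1)) (PySem.Dict.empty : PySem.Dict Char Int)).getD ch 0|)]
  rw [zero_add]
  set U := PySem.Set.union (PySem.Set.ofList (s.foldl (fun d ch => d.insert ch (d.getD ch 0 + 1)) (PySem.Dict.empty : PySem.Dict Char Int)).keys) (PySem.Set.ofList (t.foldl (fun d ch => d.insert ch (d.getD ch 0 + 1)) (PySem.Dict.empty : PySem.Dict Char Int)).keys) with hU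
  have hmemU : ∀ c, c ∈ U ↔ c ∈ s ∨ c ∈ t := by
    intro c
    rw [hU, PySem.Set.mem_union, hskeys, htkeys,
      PySem.Set.mem_ofList, PySem.Set.mem_ofList, PySem.Set.mem_ofList, PySem.Set.mem_ofList]
  have hnodupU : U.Nodup := by
    rw [hU, hskeys, htkeys]
    exact PySem.Set.nodup_union _ _ (PySem.Set.nodup_ofList _)
  have hg : ∀ c ∈ U,
      |(s.foldl (fun d ch => d.insert ch (d.getD ch 0 + 1)) (PySem.Dict.empty : PySem.Dict Char Int)).getD c 0 - (t.foldl (fun d ch => d.insert ch (d.getD ch 0 + 1)) (PySem.Dict.empty : PySem.Dict Char Int)).getD c 0|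
      = |(s.count c : Int) - (t.count c : Int)| := by
    intro c _
    rw [PySem.Dict.getD_foldl_insert_add_one, PySem.Dict.getD_foldl_insert_add_one]
    simp
  rw [List.map_congr_left hg]
  rw [← List.sum_toFinset _ hnodupU]
  apply Finset.sum_congr _ (fun _ _ => rfl)
  apply Finset.ext
  intro c
  rw [List.mem_toFinset, List.mem_toFinset, hmemU, List.mem_append]

-- ===== VERDICT (by name: the statement is the Claim_ definition above) =====
theorem bag_distance_spec : Claim_equal_bag_distance := by
  intro source target _
  unfold Spec_bag_distance
  rw [a_eq_sum]
  unfold bag_distance_alt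
  simp only []
  rw [b_loop_inv source.toList target.toList 0, zero_add]
  exact (cards_eq_sum source.toList target.toList).symm
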